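-- pv_equiv track=rewrite | github.com/cute-cirno/LeetCode | Normal/HW-Q6.py | max_greater_pairs_count
-- ===== SOURCE A (Python) =====
-- def max_greater_pairs_count(a, b):
--     a.sort()
--     b.sort()
--
--     i = len(a) - 1
--     j = len(b) - 1
--     count = 0
--
--     while i >= 0 and j >= 0:
--         if a[i] > b[j]:
--             count += 1
--             i -= 1
--             j -= 1
--         else:
--             j -= 1
--
--     return count
--
-- a = [8, 1, 7, 3, 6, 1, 4, 6, 11,17]
--
-- b = [4, 10, 2, 5, 9, 245, 343, 12, 3,1]
-- ===== SOURCE B (Python) =====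
-- def max_greater_pairs_count(a, b):
--     a.sort()
--     b.sort()
--     n = len(a)
--     # feasibility criterion: k pairs are achievable iff the k largest a's,
--     # matched in order against the k smallest b's, each win; this is monotone
--     # in k, so binary-search the largest feasible k.
--     lo, hi = 0, min(n, len(b))
--     while lo < hi:
--         mid = (lo + hi + 1) // 2
--         if all(x > y for x, y in zip(a[n - mid:], b[:mid])):
--             lo = mid
--         else:
--             hi = mid - 1
--     return lo
-- ===== Notes on version B (the rewrite author's own statement) =====
-- stated objective: alternative
-- what changed: Instead of A's greedy back-to-front two-pointer pairing, B binary-searches the largest pair count k satisfying the closed feasibility criterion 'the k largest a's beat the k smallest b's pointwise' (checked with zip/all); equality is proved via a greedy-achieves-max-feasible argument plus monotonicity of the criterion.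
import Mathlib
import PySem

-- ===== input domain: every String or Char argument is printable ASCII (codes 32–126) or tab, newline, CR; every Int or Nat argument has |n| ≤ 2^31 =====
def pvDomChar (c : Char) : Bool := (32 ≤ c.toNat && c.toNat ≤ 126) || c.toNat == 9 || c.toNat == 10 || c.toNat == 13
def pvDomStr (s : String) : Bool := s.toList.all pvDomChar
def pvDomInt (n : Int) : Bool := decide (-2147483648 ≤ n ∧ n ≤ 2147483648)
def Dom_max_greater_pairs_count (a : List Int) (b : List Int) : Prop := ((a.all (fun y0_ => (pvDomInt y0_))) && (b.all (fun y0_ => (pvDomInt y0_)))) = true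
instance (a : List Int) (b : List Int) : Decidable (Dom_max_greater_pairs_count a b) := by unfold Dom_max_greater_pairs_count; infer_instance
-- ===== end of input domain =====

-- B replaces A's back-to-front greedy two-pointer by a binary search for the largest pair count k
-- for which the k largest a's beat the k smallest b's pointwise; equal return value is proved. Note: the Python A (and B) sort the argument lists in place; the equivalence
-- proved here is about the RETURN value only (B performs the same in-place sorts).

-- ===== PORT A =====
-- while i >= 0 and j >= 0, indices counting down; i,j are encoded shifted by one as Nats
-- (Python's i corresponds to the Nat i+1, so 'i >= 0' is the cons pattern). a[i]/b[j] are always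
-- in range here, so getD is exact.
def pvAGo (sa sb : List Int) : Nat → Nat → Int → Int
  | i+1, j+1, count =>
    if sa.getD i 0 > sb.getD j 0 then pvAGo sa sb i j (count + 1)
    else pvAGo sa sb (i+1) j count
  | _, _, count => count
  termination_by i j _ => i + j

def max_greater_pairs_count (a : List Int) (b : List Int) : Int :=
  let sa := PySem.List.sorted a (fun x => x) false
  let sb := PySem.List.sorted b (fun x => x) false
  pvAGo sa sb sa.length sb.length 0

-- ===== PORT B =====
-- all(x > y for x, y in zip(a[n-k:], b[:k])); the slices' bounds are in range and non-negative
-- (0 ≤ n-k ≤ n, 0 ≤ k ≤ len(b)), so List.drop/List.take are exact for them.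
def pvCheck (sa sb : List Int) (k : Nat) : Bool :=
  ((sa.drop (sa.length - k)).zip (sb.take k)).all (fun p => decide (p.1 > p.2))

-- while lo < hi with mid = (lo + hi + 1) // 2; lo, hi, mid stay non-negative, so Nat and
-- Nat division are exact for Python's // here.
def pvBSearch (sa sb : List Int) (lo hi : Nat) : Nat :=
  if _h : lo < hi then
    let mid := (lo + hi + 1) / 2
    if pvCheck sa sb mid then pvBSearch sa sb mid hi
    else pvBSearch sa sb lo (mid - 1)
  else lo
  termination_by hi - lo
  decreasing_by all_goals omega

def max_greater_pairs_count_alt (a : List Int) (b : List Int) : Int :=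
  let sa := PySem.List.sorted a (fun x => x) false
  let sb := PySem.List.sorted b (fun x => x) false
  (pvBSearch sa sb 0 (min sa.length sb.length) : Int)

-- ===== PRECONDITION & SPEC =====
def Spec_max_greater_pairs_count (a : List Int) (b : List Int) (out : Int) : Prop := out = max_greater_pairs_count_alt a b
instance (a : List Int) (b : List Int) (out : Int) : Decidable (Spec_max_greater_pairs_count a b out) := by unfold Spec_max_greater_pairs_count; infer_instance

-- ===== CLAIM (what is proved, stated in full; the proofs are below) =====
def Claim_equal_max_greater_pairs_count : Prop := ∀ (a : List Int) (b : List Int), Dom_max_greater_pairs_count a b → Spec_max_greater_pairs_count a b (max_greater_pairs_count a b)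

-- ===== LEMMAS AND PROOFS =====

-- Accumulator-free version of A's loop (arguments are the still-unprocessed prefixes, reversed,
-- i.e. largest-first).
def pvF : List Int → List Int → Nat
  | x :: xs, y :: ys => if x > y then 1 + pvF xs ys else pvF (x :: xs) ys
  | _, _ => 0
  termination_by xs ys => xs.length + ys.length

-- Front-to-front greedy (smallest-first), the bridge between A's loop and B's feasibility scan.
def pvG : List Int → List Int → Nat
  | x :: xs, y :: ys => if x > y then 1 + pvG xs ys else pvG xs (y :: ys)
  | _, _ => 0

theorem pvF_nil_left (ys : List Int) : pvF [] ys = 0 := by cases ys <;> simp [pvF]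

theorem pvF_nil_right (xs : List Int) : pvF xs [] = 0 := by cases xs <;> simp [pvF]

theorem pvG_nil_left (ys : List Int) : pvG [] ys = 0 := by cases ys <;> rfl

theorem pvG_nil_right (xs : List Int) : pvG xs [] = 0 := by cases xs <;> rfl

theorem pvAGo_eq (sa sb : List Int) (i j : Nat) (c : Int)
    (hi : i ≤ sa.length) (hj : j ≤ sb.length) :
    pvAGo sa sb i j c = c + (pvF ((sa.take i).reverse) ((sb.take j).reverse) : Int) := by
  induction i generalizing j c with
  | zero => simp [pvAGo, pvF_nil_left]
  | succ i ih =>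
    induction j generalizing c with
    | zero => simp [pvAGo, pvF_nil_right]
    | succ j ihj =>
      have hi' : i < sa.length := hi
      have hj' : j < sb.length := hj
      have ta : (sa.take (i+1)).reverse = sa.getD i 0 :: (sa.take i).reverse := by
        rw [List.take_add_one, List.getElem?_eq_getElem hi', List.getD_eq_getElem _ _ hi']
        simp
      have tb : (sb.take (j+1)).reverse = sb.getD j 0 :: (sb.take j).reverse := by
        rw [List.take_add_one, List.getElem?_eq_getElem hj', List.getD_eq_getElem _ _ hj']
        simp
      rw [pvAGo, ta, tb, pvF]
      split
      · rw [ih j (c+1) (Nat.le_of_lt hi') (Nat.le_of_lt hj')]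
        push_cast; ring
      · rw [ihj c (Nat.le_of_lt hj'), ta]

-- pvG of a list all of whose elements are ≤ y against the single list [y] is 0.
theorem pvG_single_le (C : List Int) (y : Int) (h : ∀ e ∈ C, e ≤ y) : pvG C [y] = 0 := by
  induction C with
  | nil => rfl
  | cons p rest ih =>
    have hp : ¬ p > y := by
      have := h p (by simp)
      omega
    simp only [pvG, if_neg hp]
    exact ih (fun e he => h e (by simp [he]))

theorem pvG_single_gt (A : List Int) (x y : Int) (h : x > y) : pvG (A ++ [x]) [y] = 1 := by
  induction A with
  | nil => simp [pvG, if_pos h]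
  | cons p rest ih =>
    by_cases hp : p > y
    · simp [pvG, if_pos hp, pvG_nil_right]
    · simpa [pvG, if_neg hp] using ih

-- The exchange lemma: appending the maxima x and y, the front greedy either pairs x with y
-- (when x > y) or can never use x at all.
theorem pvG_snoc (A B : List Int) (x y : Int)
    (hA : ∀ e ∈ A, e ≤ x) (hB : ∀ e ∈ B, e ≤ y) :
    pvG (A ++ [x]) (B ++ [y]) = if x > y then 1 + pvG A B else pvG (A ++ [x]) B := by
  induction A generalizing B with
  | nil =>
    cases B with
    | nil =>
      by_cases h : x > y <;> simp [pvG, h, pvG_nil_right]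
    | cons z bs =>
      have hz : z ≤ y := hB z (by simp)
      by_cases h : x > y
      · have hxz : x > z := by omega
        simp [pvG, h, hxz]
      · by_cases hxz : x > z <;> simp [pvG, h, hxz]
  | cons p as ih =>
    cases B with
    | nil =>
      by_cases h : x > y
      · rw [if_pos h, pvG_nil_right, List.nil_append]
        have : pvG ((p :: as) ++ [x]) [y] = 1 := pvG_single_gt (p :: as) x y h
        omega
      · rw [if_neg h]
        have hle : ∀ e ∈ (p :: as) ++ [x], e ≤ y := by
          intro e he
          rcases List.mem_append.mp he with h1 | h1
          · exact le_trans (hA e h1) (by omega)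
          · simp at h1; omega
        rw [List.nil_append, pvG_single_le _ y hle, pvG_nil_right]
    | cons q bs =>
      have hA' : ∀ e ∈ as, e ≤ x := fun e he => hA e (by simp [he])
      have hB' : ∀ e ∈ bs, e ≤ y := fun e he => hB e (by simp [he])
      have hqB : ∀ e ∈ q :: bs, e ≤ y := hB
      simp only [List.cons_append, pvG]
      by_cases hpq : p > q
      · rw [if_pos hpq, if_pos hpq, ih bs hA' hB']
        split <;> ring
      · rw [if_neg hpq, if_neg hpq]
        have := ih (q :: bs) hA' hqB
        simp only [List.cons_append] at this
        rw [this]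
        split <;> rfl

-- Back-to-front greedy on descending lists equals the front greedy on their (ascending) reversals.
theorem pvF_eq_pvG (rb ra : List Int)
    (ha : ra.Pairwise (· ≥ ·)) (hb : rb.Pairwise (· ≥ ·)) :
    pvF ra rb = pvG ra.reverse rb.reverse := by
  induction rb generalizing ra with
  | nil => simp [pvF_nil_right, pvG_nil_right]
  | cons y ys ih =>
    cases ra with
    | nil => simp [pvF_nil_left, pvG_nil_left]
    | cons x xs =>
      have hax : ∀ e ∈ xs.reverse, e ≤ x := by
        intro e he
        exact (List.pairwise_cons.mp ha).1 e (List.mem_reverse.mp he)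
      have hby : ∀ e ∈ ys.reverse, e ≤ y := by
        intro e he
        exact (List.pairwise_cons.mp hb).1 e (List.mem_reverse.mp he)
      have ha' := (List.pairwise_cons.mp ha).2
      have hb' := (List.pairwise_cons.mp hb).2
      simp only [List.reverse_cons]
      rw [pvG_snoc xs.reverse ys.reverse x y hax hby, pvF]
      split
      · rw [ih xs ha' hb']
      · rw [ih (x :: xs) ha hb']
        simp

-- The greedy count never exceeds either length.
theorem pvG_le (sa sb : List Int) : pvG sa sb ≤ min sa.length sb.length := by
  induction sa generalizing sb with
  | nil => simp [pvG_nil_left]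
  | cons x xs ih =>
    cases sb with
    | nil => simp [pvG_nil_right]
    | cons y ys =>
      simp only [pvG]
      split
      · have := ih ys; simp at this ⊢; omega
      · have := ih (y :: ys); simp at this ⊢; omega

-- Two index facts used by both directions below.
theorem pvDropCons (x : Int) (xs : List Int) (k : Nat) (h : k < xs.length) :
    (x :: xs).drop (xs.length - k) = xs.drop (xs.length - k - 1) := by
  obtain ⟨t, ht⟩ : ∃ t, xs.length - k = t + 1 := ⟨xs.length - k - 1, by omega⟩
  rw [ht, List.drop_succ_cons]
  simp

theorem pvDropGet (xs : List Int) (k : Nat) (h : k < xs.length) :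
    xs.drop (xs.length - k - 1) =
      xs[xs.length - k - 1]'(by omega) :: xs.drop (xs.length - k) := by
  have h2 : xs.length - k = (xs.length - k - 1) + 1 := by omega
  rw [List.drop_eq_getElem_cons (by omega : xs.length - k - 1 < xs.length), ← h2]

-- L1: on sorted lists the greedy count is feasible.
theorem pvCheck_pvG (sa sb : List Int)
    (ha : sa.Pairwise (· ≤ ·)) (hb : sb.Pairwise (· ≤ ·)) :
    pvCheck sa sb (pvG sa sb) = true := by
  induction sa generalizing sb with
  | nil => simp [pvG_nil_left, pvCheck]
  | cons x xs ih =>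
    cases sb with
    | nil => simp [pvG_nil_right, pvCheck]
    | cons y ys =>
      have ha' := (List.pairwise_cons.mp ha).2
      have hb' := (List.pairwise_cons.mp hb).2
      have hxxs := (List.pairwise_cons.mp ha).1
      simp only [pvG]
      split
      · -- x > y: count = 1 + c', need check at 1 + c'
        rename_i hxy
        have hih := ih ys ha' hb'
        have hcm := pvG_le xs ys
        set c' := pvG xs ys with hc'def
        have hcn : c' ≤ xs.length := le_trans hcm (Nat.min_le_left _ _)
        unfold pvCheck at hih ⊢
        have hlen : (x :: xs).length - (1 + c') = xs.length - c' := by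
          simp only [List.length_cons]; omega
        have htake : (y :: ys).take (1 + c') = y :: ys.take c' := by
          rw [Nat.add_comm, List.take_succ_cons]
        rw [hlen, htake]
        rcases Nat.lt_or_ge c' xs.length with hlt | hge
        · rw [pvDropCons x xs c' hlt, pvDropGet xs c' hlt]
          simp only [List.zip_cons_cons, List.all_cons, Bool.and_eq_true, decide_eq_true_eq]
          refine ⟨?_, hih⟩
          have hmem : xs[xs.length - c' - 1]'(by omega) ∈ xs := List.getElem_mem _
          have := hxxs _ hmem
          omega
        · have hceq : c' = xs.length := le_antisymm hcn hge
          have h0 : xs.length - c' = 0 := by omega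
          rw [h0, List.drop_zero]
          rw [h0, List.drop_zero] at hih
          simp only [List.zip_cons_cons, List.all_cons, Bool.and_eq_true, decide_eq_true_eq]
          exact ⟨hxy, hih⟩
      · -- x ≤ y: count = pvG xs (y::ys), x is discarded
        have hih := ih (y :: ys) ha' hb
        have hcm := pvG_le xs (y :: ys)
        set c' := pvG xs (y :: ys) with hc'def
        have hcn : c' ≤ xs.length := le_trans hcm (Nat.min_le_left _ _)
        unfold pvCheck at hih ⊢
        have h1 : (x :: xs).length - c' = (xs.length - c') + 1 := by
          simp only [List.length_cons]; omega
        rw [h1, List.drop_succ_cons]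
        exact hih

-- L2: any feasible k (within the lengths) is at most the greedy count.
theorem pvCheck_le_pvG (sa sb : List Int) (k : Nat)
    (hk : k ≤ min sa.length sb.length) (hfeas : pvCheck sa sb k = true) :
    k ≤ pvG sa sb := by
  induction sa generalizing sb k with
  | nil => simp at hk; omega
  | cons x xs ih =>
    cases sb with
    | nil => simp at hk; omega
    | cons y ys =>
      cases k with
      | zero => exact Nat.zero_le _
      | succ k' =>
        have hk1 : k' ≤ xs.length := by simp at hk; omega
        have hk2 : k' ≤ ys.length := by simp at hk; omega
        have hlen : (x :: xs).length - (k' + 1) = xs.length - k' := by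
          simp only [List.length_cons]; omega
        unfold pvCheck at hfeas
        rw [hlen, List.take_succ_cons] at hfeas
        simp only [pvG]
        split
        · -- x > y branch: reduce to feasibility of k' on (xs, ys)
          have hf' : pvCheck xs ys k' = true := by
            unfold pvCheck
            rcases Nat.lt_or_ge k' xs.length with hlt | hge
            · rw [pvDropCons x xs k' hlt, pvDropGet xs k' hlt] at hfeas
              simp only [List.zip_cons_cons, List.all_cons, Bool.and_eq_true] at hfeas
              exact hfeas.2
            · have h0 : xs.length - k' = 0 := by omega
              rw [h0, List.drop_zero] at hfeas
              simp only [List.zip_cons_cons, List.all_cons, Bool.and_eq_true] at hfeas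
              rw [h0, List.drop_zero]
              exact hfeas.2
          have := ih ys k' (by simp; omega) hf'
          omega
        · -- x ≤ y branch: push the whole window into xs
          rename_i hxy
          rcases Nat.lt_or_ge k' xs.length with hlt | hge
          · rw [pvDropCons x xs k' hlt] at hfeas
            have hf' : pvCheck xs (y :: ys) (k' + 1) = true := by
              unfold pvCheck
              have h2 : xs.length - (k' + 1) = xs.length - k' - 1 := by omega
              rw [h2, List.take_succ_cons]
              exact hfeas
            exact ih (y :: ys) (k' + 1) (by simp; omega) hf'
          · -- k' = xs.length: the head pair forces x > y, contradiction
            have h0 : xs.length - k' = 0 := by omega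
            rw [h0, List.drop_zero] at hfeas
            simp only [List.zip_cons_cons, List.all_cons, Bool.and_eq_true,
              decide_eq_true_eq] at hfeas
            omega

-- allGT of a zip survives dropping the head of a sorted left list.
theorem pvZipAll_tail (xs ys : List Int) (hs : xs.Pairwise (· ≤ ·))
    (h : (xs.zip ys).all (fun p => decide (p.1 > p.2)) = true) :
    ((xs.drop 1).zip ys).all (fun p => decide (p.1 > p.2)) = true := by
  induction xs generalizing ys with
  | nil => simp
  | cons x xs ih =>
    cases ys with
    | nil => simp
    | cons y ys =>
      cases xs with
      | nil => simp
      | cons x' xs' =>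
        simp only [List.drop_succ_cons, List.drop_zero, List.zip_cons_cons,
          List.all_cons, Bool.and_eq_true, decide_eq_true_eq] at h ⊢
        have hx' : x ≤ x' := (List.pairwise_cons.mp hs).1 x' (by simp)
        have hs' := (List.pairwise_cons.mp hs).2
        refine ⟨by omega, ?_⟩
        have := ih ys hs' h.2
        simpa using this

-- allGT of a zip survives truncating the right list.
theorem pvZipAll_take (xs ys : List Int) (j : Nat)
    (h : (xs.zip ys).all (fun p => decide (p.1 > p.2)) = true) :
    ((xs.zip (ys.take j)).all (fun p => decide (p.1 > p.2))) = true := by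
  induction xs generalizing ys j with
  | nil => simp
  | cons x xs ih =>
    cases ys with
    | nil => simp
    | cons y ys =>
      cases j with
      | zero => simp
      | succ j =>
        simp only [List.take_succ_cons, List.zip_cons_cons, List.all_cons,
          Bool.and_eq_true] at h ⊢
        exact ⟨h.1, ih ys j h.2⟩

-- Feasibility is monotone downward (on a sorted a-side).
theorem pvCheck_mono (sa sb : List Int) (k : Nat)
    (ha : sa.Pairwise (· ≤ ·))
    (hk : k + 1 ≤ min sa.length sb.length)
    (h : pvCheck sa sb (k + 1) = true) : pvCheck sa sb k = true := by
  unfold pvCheck at h ⊢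
  have hkn : k < sa.length := by omega
  have hD : sa.Pairwise (· ≤ ·) → (sa.drop (sa.length - (k+1))).Pairwise (· ≤ ·) :=
    fun hp => hp.drop
  have h1 : ((sa.drop (sa.length - (k+1))).zip ((sb.take (k+1)).take k)).all
      (fun p => decide (p.1 > p.2)) = true := pvZipAll_take _ _ k h
  have h2 : (sb.take (k+1)).take k = sb.take k := by
    rw [List.take_take]
    congr 1
    omega
  rw [h2] at h1
  have h3 : (((sa.drop (sa.length - (k+1))).drop 1).zip (sb.take k)).all
      (fun p => decide (p.1 > p.2)) = true := pvZipAll_tail _ _ (hD ha) h1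
  have h4 : (sa.drop (sa.length - (k+1))).drop 1 = sa.drop (sa.length - k) := by
    rw [List.drop_drop]
    congr 1
    omega
  rwa [h4] at h3

-- Hence every k below a feasible bound is feasible.
theorem pvCheck_down (sa sb : List Int) (ha : sa.Pairwise (· ≤ ·)) (k j : Nat)
    (hj : j ≤ k) (hk : k ≤ min sa.length sb.length)
    (h : pvCheck sa sb k = true) : pvCheck sa sb j = true := by
  induction k with
  | zero => have : j = 0 := by omega
            rw [this]; exact h
  | succ k ih =>
    rcases Nat.lt_or_ge j (k + 1) with hlt | hge
    · exact ih (by omega) (by omega) (pvCheck_mono sa sb k ha hk h)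
    · have : j = k + 1 := by omega
      rw [this]; exact h

-- The binary search returns c when c is feasible-maximal between lo and hi.
theorem pvBSearch_eq (sa sb : List Int) (c : Nat) (d lo hi : Nat)
    (hd : hi - lo ≤ d) (hlo : lo ≤ c) (hhi : c ≤ hi)
    (hmax : ∀ k, k ≤ hi → pvCheck sa sb k = true → k ≤ c)
    (hfeas : ∀ k, k ≤ c → pvCheck sa sb k = true) :
    pvBSearch sa sb lo hi = c := by
  induction d generalizing lo hi with
  | zero =>
    unfold pvBSearch
    rw [dif_neg (by omega : ¬ lo < hi)]
    omega
  | succ d ih =>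
    unfold pvBSearch
    split
    · rename_i hlh
      simp only
      set mid := (lo + hi + 1) / 2 with hmid
      have hm1 : lo < mid := by omega
      have hm2 : mid ≤ hi := by omega
      split
      · rename_i hchk
        exact ih mid hi (by omega) (hmax mid hm2 hchk) hhi hmax
      · rename_i hchk
        have hcm : c < mid := by
          by_contra hcm
          exact hchk (hfeas mid (by omega))
        exact ih lo (mid - 1) (by omega) hlo (by omega)
          (fun k hk hf => hmax k (by omega) hf)
    · omega

-- ===== VERDICT (by name: the statement is the Claim_ definition above) =====
theorem max_greater_pairs_count_spec : Claim_equal_max_greater_pairs_count := by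
  intro a b _
  unfold Spec_max_greater_pairs_count max_greater_pairs_count max_greater_pairs_count_alt
  simp only
  set sa := PySem.List.sorted a (fun x => x) false with hsa
  set sb := PySem.List.sorted b (fun x => x) false with hsb
  have hsorted_a : sa.Pairwise (· ≤ ·) := by
    simpa using PySem.List.sorted_pairwise (xs := a) (key := fun x => x)
  have hsorted_b : sb.Pairwise (· ≤ ·) := by
    simpa using PySem.List.sorted_pairwise (xs := b) (key := fun x => x)
  have hra : sa.reverse.Pairwise (· ≥ ·) := by
    rw [List.pairwise_reverse]; exact hsorted_a
  have hrb : sb.reverse.Pairwise (· ≥ ·) := by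
    rw [List.pairwise_reverse]; exact hsorted_b
  have hAG : pvAGo sa sb sa.length sb.length 0 = (pvG sa sb : Int) := by
    rw [pvAGo_eq sa sb sa.length sb.length 0 (le_refl _) (le_refl _),
        List.take_length, List.take_length,
        pvF_eq_pvG sb.reverse sa.reverse hra hrb,
        List.reverse_reverse, List.reverse_reverse]
    ring
  have hscan : pvBSearch sa sb 0 (min sa.length sb.length) = pvG sa sb :=
    pvBSearch_eq sa sb (pvG sa sb) (min sa.length sb.length) 0 (min sa.length sb.length)
      (by omega) (Nat.zero_le _) (pvG_le sa sb)
      (fun k hk hf => pvCheck_le_pvG sa sb k hk hf)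
      (fun k hk => pvCheck_down sa sb hsorted_a (pvG sa sb) k hk (pvG_le sa sb)
        (pvCheck_pvG sa sb hsorted_a hsorted_b))
  rw [hAG, hscan]
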